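-- pv_equiv track=rewrite | github.com/zhanggiene/gcc-2021-zhanggiene-main | Question4/Question4.py | totalPairs
-- ===== SOURCE A (Python) =====
-- def totalPairs(n, values):
--     # Participants code will be here
--     counter=0
--     for start in range(len(values)-1):
--         currMax=0
--         for end in values[start+1:]:
--             if (end>currMax and values[start]>currMax):
--                 counter+=1
--                 currMax=max(currMax,end)
--     return counter
-- ===== SOURCE B (Python) =====
-- def totalPairs(n, values):
--     # Right-to-left single pass with a monotone stack of the suffix's positive
--     # running maxima; each pair counted by A corresponds to a stack element,
--     # so min(stack size, #popped-below-v + 1) gives A's inner count in O(1) amortized.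
--     total = 0
--     stack = []  # positive running maxima of the suffix, smallest on top (end)
--     for v in reversed(values):
--         if v > 0:
--             k = len(stack)
--             t = 0
--             while stack and stack[-1] <= v:
--                 if stack.pop() < v:
--                     t += 1
--             total += min(k, t + 1)
--             stack.append(v)
--     return total
-- ===== Notes on version B (the rewrite author's own statement) =====
-- stated objective: faster
-- what changed: Replaces the nested start/suffix scans by one right-to-left pass with a monotone stack of the suffix's positive running maxima; A's inner count equals min(stack size, popped-below-v + 1), so each element is pushed/popped once.
import Mathlib
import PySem

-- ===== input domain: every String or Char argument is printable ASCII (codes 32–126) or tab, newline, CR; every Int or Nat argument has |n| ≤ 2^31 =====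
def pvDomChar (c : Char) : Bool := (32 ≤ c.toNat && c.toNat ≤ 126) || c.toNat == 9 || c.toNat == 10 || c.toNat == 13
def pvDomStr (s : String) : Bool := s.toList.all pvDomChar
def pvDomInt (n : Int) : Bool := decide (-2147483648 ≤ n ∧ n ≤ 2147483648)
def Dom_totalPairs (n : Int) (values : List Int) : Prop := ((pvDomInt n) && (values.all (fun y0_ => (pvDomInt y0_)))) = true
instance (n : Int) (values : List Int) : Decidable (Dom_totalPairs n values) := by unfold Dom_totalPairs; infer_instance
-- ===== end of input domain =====

-- B replaces A's quadratic nested scans by one right-to-left monotone-stack pass (measured asymptotically faster).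

-- ===== PORT A =====
def totalPairs (n : Int) (values : List Int) : Int :=
  (PySem.List.pyRange 0 ((values.length : Int) - 1) 1).foldl
    (fun counter start =>
      ((PySem.List.slice values (some (start + 1)) none).foldl
        (fun (st : Int × Int) e =>
          if e > st.2 ∧ PySem.List.pyGetD values start 0 > st.2 then (st.1 + 1, max st.2 e)
          else st)
        (counter, 0)).1)
    0

-- ===== PORT B =====
-- pop the stack (top at head) while top ≤ v, counting how many popped values are < v
def popCount (v : Int) : List Int → Int × List Int
  | [] => (0, [])
  | x :: s =>
    if x ≤ v then
      let p := popCount v s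
      (if x < v then p.1 + 1 else p.1, p.2)
    else (0, x :: s)

-- right-to-left pass: returns (total so far, stack of positive running maxima of the suffix)
def goB : List Int → Int × List Int
  | [] => (0, [])
  | v :: l =>
    let p := goB l
    if v > 0 then
      let q := popCount v p.2
      (p.1 + min (p.2.length : Int) (q.1 + 1), v :: q.2)
    else p

def totalPairs_alt (n : Int) (values : List Int) : Int := (goB values).1

-- ===== PRECONDITION & SPEC =====
def Spec_totalPairs (n : Int) (values : List Int) (out : Int) : Prop := out = totalPairs_alt n values
instance (n : Int) (values : List Int) (out : Int) : Decidable (Spec_totalPairs n values out) := by unfold Spec_totalPairs; infer_instance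

-- ===== CLAIM (what is proved, stated in full; the proofs are below) =====
def Claim_equal_totalPairs : Prop := ∀ (n : Int) (values : List Int), Dom_totalPairs n values → Spec_totalPairs n values (totalPairs n values)

-- ===== LEMMAS AND PROOFS =====

-- chain of running maxima of l that exceed c
def stkc (c : Int) : List Int → List Int
  | [] => []
  | x :: l => if x > c then x :: stkc x l else stkc c l

-- A's inner-loop count for threshold value v starting from currMax = c
def gIn (v c : Int) : List Int → Int
  | [] => 0
  | x :: l => if x > c ∧ v > c then 1 + gIn v x l else gIn v c l

def sumSpec : List Int → Int
  | [] => 0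
  | v :: l => gIn v 0 l + sumSpec l

theorem stkc_gt : ∀ (l : List Int) (c : Int), ∀ x ∈ stkc c l, c < x := by
  intro l
  induction l with
  | nil => intro c x hx; simp [stkc] at hx
  | cons y l ih =>
    intro c x hx
    simp only [stkc] at hx
    by_cases hyc : y > c
    · rw [if_pos hyc, List.mem_cons] at hx
      rcases hx with rfl | h
      · exact hyc
      · have := ih y x h; omega
    · rw [if_neg hyc] at hx
      exact ih c x hx

theorem dropWhile_stkc : ∀ (l : List Int) (c v : Int), c ≤ v →
    (stkc c l).dropWhile (fun x => decide (x ≤ v)) = stkc v l := by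
  intro l
  induction l with
  | nil => intro c v _; simp [stkc]
  | cons y l ih =>
    intro c v hcv
    simp only [stkc]
    by_cases hyc : y > c
    · simp only [hyc, if_pos]
      by_cases hyv : y ≤ v
      · rw [List.dropWhile_cons_of_pos (by simpa using hyv)]
        rw [ih y v hyv]
        simp [show ¬ y > v by omega]
      · rw [List.dropWhile_cons_of_neg (by simpa using hyv)]
        simp [show y > v by omega]
    · simp only [hyc, if_neg, not_false_iff]
      rw [ih c v hcv]
      simp [show ¬ y > v by omega]

theorem countP_stkc_lt_self (l : List Int) (v : Int) :
    (stkc v l).countP (fun x => decide (x < v)) = 0 := by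
  rw [List.countP_eq_zero]
  intro x hx
  have := stkc_gt l v x hx
  simp; omega

theorem countP_takeWhile_stkc (l : List Int) (v : Int) (hv : 0 ≤ v) :
    ((stkc 0 l).takeWhile (fun x => decide (x ≤ v))).countP (fun x => decide (x < v))
      = (stkc 0 l).countP (fun x => decide (x < v)) := by
  conv_rhs => rw [← List.takeWhile_append_dropWhile (p := fun x => decide (x ≤ v)) (l := stkc 0 l)]
  rw [List.countP_append, dropWhile_stkc l 0 v hv, countP_stkc_lt_self]
  simp

theorem popCount_eq : ∀ (s : List Int) (v : Int),
    popCount v s = (((s.takeWhile (fun x => decide (x ≤ v))).countP (fun x => decide (x < v)) : Int),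
                    s.dropWhile (fun x => decide (x ≤ v))) := by
  intro s v
  induction s with
  | nil => simp [popCount]
  | cons x s ih =>
    simp only [popCount]
    by_cases hxv : x ≤ v
    · rw [if_pos hxv, ih]
      rw [List.takeWhile_cons_of_pos (by simpa using hxv),
          List.dropWhile_cons_of_pos (by simpa using hxv)]
      by_cases hlt : x < v
      · simp [hlt]
      · simp [hlt]
    · rw [if_neg hxv]
      rw [List.takeWhile_cons_of_neg (by simpa using hxv),
          List.dropWhile_cons_of_neg (by simpa using hxv)]
      simp

theorem gIn_eq : ∀ (l : List Int) (v c : Int),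
    gIn v c l = if v > c then
        min ((stkc c l).length : Int) (((stkc c l).countP (fun x => decide (x < v)) : Int) + 1)
      else 0 := by
  intro l
  induction l with
  | nil => intro v c; simp only [gIn, stkc]; split <;> simp
  | cons x l ih =>
    intro v c
    by_cases hxc : x > c
    · by_cases hvc : v > c
      · simp only [gIn, stkc, hxc, hvc, and_true, if_pos]
        rw [ih v x]
        by_cases hvx : v > x
        · rw [if_pos hvx]
          have h0 : (x :: stkc x l).countP (fun y => decide (y < v))
              = (stkc x l).countP (fun y => decide (y < v)) + 1 := by
            rw [List.countP_cons]; simp [hvx]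
          rw [h0]
          simp only [List.length_cons]
          push_cast
          omega
        · rw [if_neg hvx]
          have h0 : (x :: stkc x l).countP (fun y => decide (y < v)) = 0 := by
            rw [List.countP_eq_zero]
            intro y hy
            rw [List.mem_cons] at hy
            rcases hy with rfl | hy
            · simp; omega
            · have := stkc_gt l x y hy; simp; omega
          rw [h0]
          simp only [List.length_cons]
          push_cast
          omega
      · simp only [gIn, stkc, hxc, hvc, and_false, if_false, if_pos]
        rw [ih v c, if_neg hvc]
    · simp only [gIn, stkc, hxc, false_and, if_false]
      exact ih v c

theorem goB_eq : ∀ (l : List Int), goB l = (sumSpec l, stkc 0 l) := by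
  intro l
  induction l with
  | nil => simp [goB, sumSpec, stkc]
  | cons v l ih =>
    simp only [goB, ih]
    by_cases hv : v > 0
    · rw [if_pos hv]
      simp only [popCount_eq, countP_takeWhile_stkc l v (by omega),
        dropWhile_stkc l 0 v (by omega), sumSpec, Prod.mk.injEq]
      refine ⟨?_, ?_⟩
      · rw [gIn_eq l v 0, if_pos hv]; ring
      · simp [stkc, hv]
    · rw [if_neg hv]
      have hg : gIn v 0 l = 0 := by rw [gIn_eq l v 0, if_neg hv]
      simp [sumSpec, stkc, hv, hg]

-- A's inner fold computes the counter plus gIn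
theorem innerFold_eq : ∀ (l : List Int) (v c0 m : Int),
    ((l.foldl (fun (st : Int × Int) e =>
        if e > st.2 ∧ v > st.2 then (st.1 + 1, max st.2 e) else st) (c0, m)).1)
      = c0 + gIn v m l := by
  intro l
  induction l with
  | nil => intro v c0 m; simp [gIn]
  | cons x l ih =>
    intro v c0 m
    simp only [List.foldl_cons, gIn]
    by_cases h : x > m ∧ v > m
    · rw [if_pos h, if_pos h, ih]
      have : max m x = x := by omega
      rw [this]; ring
    · rw [if_neg h, if_neg h, ih]

theorem foldl_add_init : ∀ (L : List Nat) (g : Nat → Int) (a : Int),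
    L.foldl (fun c j => c + g j) a = a + L.foldl (fun c j => c + g j) 0 := by
  intro L
  induction L with
  | nil => intro g a; simp
  | cons x L ih =>
    intro g a
    simp only [List.foldl_cons]
    rw [ih, ih (a := 0 + g x)]
    ring

theorem foldl_ext_int : ∀ (L : List Nat) (f g : Int → Nat → Int) (a : Int),
    (∀ c j, f c j = g c j) → L.foldl f a = L.foldl g a := by
  intro L
  induction L with
  | nil => intro f g a _; simp
  | cons x L ih =>
    intro f g a h
    simp only [List.foldl_cons]
    rw [h, ih f g _ h]

theorem fold_range_gIn : ∀ (vs : List Int),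
    (List.range (vs.length - 1)).foldl
      (fun c j => c + gIn (vs.getD j 0) 0 (vs.drop (j + 1))) 0 = sumSpec vs := by
  intro vs
  induction vs with
  | nil => simp [sumSpec]
  | cons v l ih =>
    cases l with
    | nil => simp [sumSpec, gIn]
    | cons w l' =>
      simp only [List.length_cons, Nat.add_sub_cancel]
      rw [List.range_succ_eq_map, List.foldl_cons, List.foldl_map]
      have hhead : (0 : Int) + gIn ((v :: w :: l').getD 0 0) 0 ((v :: w :: l').drop 1)
          = gIn v 0 (w :: l') := by simp
      rw [hhead]
      have hbody : ∀ (c : Int) (j : Nat),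
          c + gIn ((v :: w :: l').getD (j + 1) 0) 0 ((v :: w :: l').drop (j + 1 + 1))
          = c + gIn ((w :: l').getD j 0) 0 ((w :: l').drop (j + 1)) := by
        intro c j; simp
      rw [foldl_ext_int _ _ _ _ hbody, foldl_add_init]
      have hlen : (w :: l').length - 1 = l'.length := by simp
      rw [← hlen, ih]
      simp [sumSpec]

theorem totalPairs_eq_sumSpec : ∀ (n : Int) (vs : List Int), totalPairs n vs = sumSpec vs := by
  intro n vs
  unfold totalPairs
  rw [PySem.List.pyRange_one, List.foldl_map]
  have hlen : (((vs.length : Int) - 1 - 0)).toNat = vs.length - 1 := by omega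
  rw [hlen]
  have hbody : ∀ (c : Int) (j : Nat),
      ((PySem.List.slice vs (some (0 + (j : Int) + 1)) none).foldl
        (fun (st : Int × Int) e =>
          if e > st.2 ∧ PySem.List.pyGetD vs (0 + (j : Int)) 0 > st.2
          then (st.1 + 1, max st.2 e) else st) (c, 0)).1
      = c + gIn (vs.getD j 0) 0 (vs.drop (j + 1)) := by
    intro c j
    have hs : PySem.List.slice vs (some (0 + (j : Int) + 1)) none = vs.drop (j + 1) := by
      rw [show (0 + (j : Int) + 1) = ((j + 1 : Nat) : Int) by push_cast; ring,
        PySem.List.slice_from_natCast]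
    have hg : PySem.List.pyGetD vs (0 + (j : Int)) 0 = vs.getD j 0 := by
      rw [show (0 + (j : Int)) = ((j : Nat) : Int) by simp,
        PySem.List.pyGetD_natCast]
    rw [hs, hg, innerFold_eq]
  rw [foldl_ext_int _ _ _ _ hbody, fold_range_gIn]

-- ===== VERDICT (by name: the statement is the Claim_ definition above) =====
theorem totalPairs_spec : Claim_equal_totalPairs := by
  intro n values _
  unfold Spec_totalPairs totalPairs_alt
  rw [goB_eq, totalPairs_eq_sumSpec n values]
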